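-- pv_equiv track=rewrite | github.com/xiajia666/PFLD-Camera | detect.py | count_mouth
-- ===== SOURCE A (Python) =====
-- def count_mouth(mouth_state):
--     mouth_count = 0
--     mouth_close = 0
--     Roll_mouth = 0
--     for i in range(len(mouth_state)):
--         if mouth_state[i] == 'mouth_open':
--             Roll_mouth += 1
--             mouth_count += 1
--         else:
--             if mouth_count > 10:
--                 mouth_close += 1
--             mouth_count = 0
--     return Roll_mouth, mouth_close
-- ===== SOURCE B (Python) =====
-- def count_mouth(mouth_state):
--     # collapse into (value, run_length) groups, then aggregate over the groups
--     groups = []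
--     cur, cnt = None, 0
--     for v in mouth_state:
--         if cnt and v == cur:
--             cnt += 1
--         else:
--             if cnt:
--                 groups.append((cur, cnt))
--             cur, cnt = v, 1
--     if cnt:
--         groups.append((cur, cnt))
--     roll = sum(n for v, n in groups if v == 'mouth_open')
--     close = sum(1 for v, n in groups[:-1] if v == 'mouth_open' and n > 10)
--     return roll, close
-- ===== Notes on version B (the rewrite author's own statement) =====
-- stated objective: alternative
-- what changed: Replaces A's single stateful frame-by-frame scan (pending counter reset on each non-open frame) by a run-length-encoding decomposition: the list is collapsed into (value, run_length) groups, Roll_mouth is the sum of lengths of 'mouth_open' groups, and mouth_close counts 'mouth_open' groups of length > 10 excluding the last group (a trailing long open run has no closing frame).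
import Mathlib
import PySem

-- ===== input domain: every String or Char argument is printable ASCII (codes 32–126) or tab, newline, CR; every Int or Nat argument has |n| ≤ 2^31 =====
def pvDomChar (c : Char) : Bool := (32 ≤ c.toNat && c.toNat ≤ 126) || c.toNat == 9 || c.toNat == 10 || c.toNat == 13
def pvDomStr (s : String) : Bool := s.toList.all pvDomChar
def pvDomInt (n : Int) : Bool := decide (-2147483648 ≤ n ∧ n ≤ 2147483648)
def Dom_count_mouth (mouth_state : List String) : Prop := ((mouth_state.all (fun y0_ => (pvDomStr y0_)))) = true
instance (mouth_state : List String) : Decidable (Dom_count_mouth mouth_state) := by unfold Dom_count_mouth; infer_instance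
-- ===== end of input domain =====

-- B replaces A's stateful frame-by-frame scan with a run-length-group decomposition
-- (same O(n) cost; objective: alternative decomposition). Return values only; no mutation.

-- ===== PORT A =====
-- literal port: for i in range(len(mouth_state)) with indexing, state (mouth_count, mouth_close, Roll_mouth)
-- the loop state (mouth_count, mouth_close, Roll_mouth) after the for-loop
def pvLoopA (mouth_state : List String) : Int × Int × Int :=
  (PySem.List.pyRange 0 (mouth_state.length : Int) 1).foldl
    (fun (acc : Int × Int × Int) i =>
      if PySem.List.pyGetD mouth_state i "" == "mouth_open" then
        (acc.1 + 1, acc.2.1, acc.2.2 + 1)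
      else
        if acc.1 > 10 then (0, acc.2.1 + 1, acc.2.2) else (0, acc.2.1, acc.2.2))
    ((0 : Int), (0 : Int), (0 : Int))

def count_mouth (mouth_state : List String) : Int × Int :=
  ((pvLoopA mouth_state).2.2, (pvLoopA mouth_state).2.1)

-- ===== PORT B =====
-- B's grouping loop carries (cur, cnt); here as recursion over the remaining frames
def pvGo : String → Int → List String → List (String × Int)
  | cur, cnt, [] => [(cur, cnt)]
  | cur, cnt, y :: ys => if y == cur then pvGo cur (cnt + 1) ys else (cur, cnt) :: pvGo y 1 ys

def pvGroups : List String → List (String × Int)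
  | [] => []
  | x :: xs => pvGo x 1 xs

def pvRoll (gs : List (String × Int)) : Int :=
  gs.foldl (fun (a : Int) p => if p.1 == "mouth_open" then a + p.2 else a) 0

-- groups[:-1] is exactly dropLast
def pvClose (gs : List (String × Int)) : Int :=
  gs.dropLast.foldl
    (fun (a : Int) p => if p.1 == "mouth_open" && decide ((10 : Int) < p.2) then a + 1 else a) 0

def count_mouth_alt (mouth_state : List String) : Int × Int :=
  (pvRoll (pvGroups mouth_state), pvClose (pvGroups mouth_state))

-- ===== PRECONDITION & SPEC =====
def Spec_count_mouth (mouth_state : List String) (out : Int × Int) : Prop := out = count_mouth_alt mouth_state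
instance (mouth_state : List String) (out : Int × Int) : Decidable (Spec_count_mouth mouth_state out) := by unfold Spec_count_mouth; infer_instance

-- ===== CLAIM (what is proved, stated in full; the proofs are below) =====
def Claim_equal_count_mouth : Prop := ∀ (mouth_state : List String), Dom_count_mouth mouth_state → Spec_count_mouth mouth_state (count_mouth mouth_state)

-- ===== LEMMAS AND PROOFS =====

def stepA (acc : Int × Int × Int) (s : String) : Int × Int × Int :=
  if s == "mouth_open" then (acc.1 + 1, acc.2.1, acc.2.2 + 1)
  else if acc.1 > 10 then (0, acc.2.1 + 1, acc.2.2) else (0, acc.2.1, acc.2.2)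

def rollOf : List String → Int
  | [] => 0
  | x :: xs => (if x = "mouth_open" then 1 else 0) + rollOf xs

def closeOf : Int → List String → Int
  | _, [] => 0
  | c, x :: xs => if x = "mouth_open" then closeOf (c + 1) xs
                  else (if c > 10 then 1 else 0) + closeOf 0 xs

def pendOf : Int → List String → Int
  | c, [] => c
  | c, x :: xs => if x = "mouth_open" then pendOf (c + 1) xs else pendOf 0 xs

def sumOpen : List (String × Int) → Int
  | [] => 0
  | p :: gs => (if p.1 = "mouth_open" then p.2 else 0) + sumOpen gs

def closeSum : List (String × Int) → Int
  | [] => 0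
  | p :: gs => (if p.1 = "mouth_open" ∧ p.2 > 10 then 1 else 0) + closeSum gs

theorem foldlA_eq (ms : List String) : ∀ c cl r : Int,
    ms.foldl stepA (c, cl, r) = (pendOf c ms, cl + closeOf c ms, r + rollOf ms) := by
  induction ms with
  | nil => intro c cl r; simp [pendOf, closeOf, rollOf]
  | cons x xs ih =>
    intro c cl r
    by_cases h : x = "mouth_open"
    · simp [stepA, h, pendOf, closeOf, rollOf, ih]
      ring
    · by_cases h10 : c > 10 <;>
        simp [stepA, h, h10, pendOf, closeOf, rollOf, ih] <;> ring

theorem rollFold (gs : List (String × Int)) : ∀ a : Int,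
    gs.foldl (fun (a : Int) p => if p.1 == "mouth_open" then a + p.2 else a) a = a + sumOpen gs := by
  induction gs with
  | nil => intro a; simp [sumOpen]
  | cons p gs ih =>
    intro a
    rw [List.foldl_cons, ih]
    by_cases h : p.1 = "mouth_open" <;> simp [h, sumOpen] <;> ring

theorem closeFold (gs : List (String × Int)) : ∀ a : Int,
    gs.foldl (fun (a : Int) p => if p.1 == "mouth_open" && decide ((10 : Int) < p.2) then a + 1 else a) a
      = a + closeSum gs := by
  induction gs with
  | nil => intro a; simp [closeSum]
  | cons p gs ih =>
    intro a
    rw [List.foldl_cons, ih]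
    by_cases h : p.1 = "mouth_open" <;> by_cases h2 : (10 : Int) < p.2 <;>
      simp [h, h2, closeSum] <;> omega

theorem pvGo_ne_nil (rest : List String) : ∀ cur cnt, pvGo cur cnt rest ≠ [] := by
  induction rest with
  | nil => intro cur cnt; simp [pvGo]
  | cons y ys ih =>
    intro cur cnt
    by_cases h : y = cur <;> simp [pvGo, h, ih]

theorem go_roll (rest : List String) : ∀ cur cnt,
    sumOpen (pvGo cur cnt rest) = (if cur = "mouth_open" then cnt else 0) + rollOf rest := by
  induction rest with
  | nil => intro cur cnt; simp [pvGo, sumOpen, rollOf]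
  | cons y ys ih =>
    intro cur cnt
    by_cases h : y = cur
    · subst h
      rw [show pvGo y cnt (y :: ys) = pvGo y (cnt + 1) ys from by simp [pvGo]]
      rw [ih]
      simp only [rollOf]
      split_ifs <;> omega
    · have hne : (y == cur) = false := by simpa using h
      rw [show pvGo cur cnt (y :: ys) = (cur, cnt) :: pvGo y 1 ys from by simp [pvGo, hne]]
      simp only [sumOpen, rollOf]
      rw [ih]

theorem go_close (rest : List String) : ∀ cur cnt,
    closeSum (pvGo cur cnt rest).dropLast = closeOf (if cur = "mouth_open" then cnt else 0) rest := by
  induction rest with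
  | nil => intro cur cnt; simp [pvGo, closeOf, closeSum]
  | cons y ys ih =>
    intro cur cnt
    by_cases h : y = cur
    · subst h
      rw [show pvGo y cnt (y :: ys) = pvGo y (cnt + 1) ys from by simp [pvGo]]
      rw [ih]
      by_cases ho : y = "mouth_open" <;> simp [closeOf, ho]
    · have hne : (y == cur) = false := by simpa using h
      rw [show pvGo cur cnt (y :: ys) = (cur, cnt) :: pvGo y 1 ys from by simp [pvGo, hne]]
      obtain ⟨p, gs, hgs⟩ : ∃ p gs, pvGo y 1 ys = p :: gs := by
        cases hg : pvGo y 1 ys with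
        | nil => exact absurd hg (pvGo_ne_nil ys y 1)
        | cons p gs => exact ⟨p, gs, rfl⟩
      rw [show ((cur, cnt) :: pvGo y 1 ys).dropLast = (cur, cnt) :: (pvGo y 1 ys).dropLast from by
        rw [hgs]; simp]
      simp only [closeSum]
      rw [ih]
      by_cases ho : cur = "mouth_open" <;> by_cases hy : y = "mouth_open"
      · exact absurd (hy.trans ho.symm) h
      · simp [closeOf, ho, hy]
      · simp [closeOf, ho, hy]
      · simp [closeOf, ho, hy]

theorem loopA_eq (ms : List String) : pvLoopA ms = (pendOf 0 ms, closeOf 0 ms, rollOf ms) := by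
  unfold pvLoopA
  rw [show (fun (acc : Int × Int × Int) i =>
        if PySem.List.pyGetD ms i "" == "mouth_open" then
          (acc.1 + 1, acc.2.1, acc.2.2 + 1)
        else
          if acc.1 > 10 then (0, acc.2.1 + 1, acc.2.2) else (0, acc.2.1, acc.2.2))
      = (fun (acc : Int × Int × Int) i => stepA acc (PySem.List.pyGetD ms i "")) from by
        funext acc i; simp [stepA]]
  rw [PySem.List.foldl_pyRange_zero_pyGetD' ms "" stepA ((0 : Int), (0 : Int), (0 : Int))]
  rw [foldlA_eq ms 0 0 0]
  simp

theorem countA_eq (ms : List String) : count_mouth ms = (rollOf ms, closeOf 0 ms) := by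
  simp [count_mouth, loopA_eq]

theorem countB_eq (ms : List String) : count_mouth_alt ms = (rollOf ms, closeOf 0 ms) := by
  cases ms with
  | nil => simp [count_mouth_alt, pvGroups, pvRoll, pvClose, rollOf, closeOf]
  | cons x xs =>
    unfold count_mouth_alt pvRoll pvClose
    rw [show pvGroups (x :: xs) = pvGo x 1 xs from rfl]
    rw [rollFold, closeFold, go_roll, go_close]
    by_cases h : x = "mouth_open" <;> simp [h, rollOf, closeOf]

-- ===== VERDICT (by name: the statement is the Claim_ definition above) =====
theorem count_mouth_spec : Claim_equal_count_mouth := by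
  intro ms _
  unfold Spec_count_mouth
  rw [countA_eq, countB_eq]
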